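-- pv_equiv track=rewrite | github.com/worldvisualizer/stuck-with-codes | algorithms/kickstart/2021/roundb/pythons/increasing_substring.py | increasing_substring
-- ===== SOURCE A (Python) =====
-- def increasing_substring(string):
--     """
--     candidates array
--     maxlen array
--     """
--     maxlens, maxlen, curr = [1], 1, string[0]
--     for i in range(1, len(string)):
--         if curr[-1] < string[i]:
--             curr += string[i]
--             maxlen += 1
--         else:
--             maxlen = 1
--             curr = string[i]
--         maxlens.append(maxlen)
--     return maxlens
-- ===== SOURCE B (Python) =====
-- def increasing_substring(string):
--     runs = []
--     curr = string[0]
--     for ch in string[1:]: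
--         if curr[-1] < ch:
--             curr += ch
--         else:
--             runs.append(curr)
--             curr = ch
--     runs.append(curr)
--     return [i + 1 for run in runs for i in range(len(run))]
-- ===== Notes on version B (the rewrite author's own statement) =====
-- stated objective: alternative
-- what changed: B first partitions the string into its maximal strictly-increasing runs (list of groups) and then expands each run into 1..len(run) with a flattening comprehension, instead of A's single pass that maintains a running counter appended at each index.
import Mathlib
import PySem

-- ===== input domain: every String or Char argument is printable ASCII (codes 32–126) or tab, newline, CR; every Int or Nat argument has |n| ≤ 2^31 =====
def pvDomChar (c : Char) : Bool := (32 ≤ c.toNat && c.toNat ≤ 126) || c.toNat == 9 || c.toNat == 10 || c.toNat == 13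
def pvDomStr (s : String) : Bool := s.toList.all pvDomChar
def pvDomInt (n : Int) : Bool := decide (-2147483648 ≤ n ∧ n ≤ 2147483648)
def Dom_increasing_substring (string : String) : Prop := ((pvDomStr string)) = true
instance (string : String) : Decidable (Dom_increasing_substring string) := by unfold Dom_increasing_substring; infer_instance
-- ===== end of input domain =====

-- ===== PORT A =====
-- B restructures A: runs are materialized first, then expanded; return values proved equal. Objective: alternative decomposition.
-- A: one pass keeping a running counter `maxlen` and the current run string `curr`, appending the counter at each index.
def increasing_substring (string : String) : List Int :=
  match string.toList with
  | [] => []  -- Python A raises IndexError here (string[0]); excluded by Pre_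
  | c :: rest =>
    (rest.foldl
      (fun (st : List Int × Int × List Char) ch =>
        let (maxlens, maxlen, curr) := st
        if curr.getLast! < ch then
          (maxlens ++ [maxlen + 1], maxlen + 1, curr ++ [ch])
        else
          (maxlens ++ [1], 1, [ch]))
      ([1], 1, [c])).1

-- ===== PORT B =====
-- helper for B: expand one run into [1, 2, …, len run]
def pvExpandRun (run : List Char) : List Int :=
  (List.range run.length).map (fun i => ((i : Int) + 1))

-- B: phase 1 partitions the characters into maximal strictly-increasing runs; phase 2 flattens each run into 1..len.
def increasing_substring_alt (string : String) : List Int :=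
  match string.toList with
  | [] => []  -- B also raises IndexError here; excluded by Pre_
  | c :: rest =>
    let st := rest.foldl
      (fun (st : List (List Char) × List Char) ch =>
        let (runs, curr) := st
        if curr.getLast! < ch then (runs, curr ++ [ch])
        else (runs ++ [curr], [ch]))
      ([], [c])
    (st.1 ++ [st.2]).flatMap pvExpandRun

-- ===== PRECONDITION & SPEC =====
-- Pre_ excludes only the empty string, on which Python A raises IndexError at string[0] (B raises there too).
def Pre_increasing_substring (string : String) : Prop := string ≠ ""
instance (string : String) : Decidable (Pre_increasing_substring string) := by unfold Pre_increasing_substring; infer_instance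
def pvWitness_increasing_substring : String := "abc"
def Spec_increasing_substring (string : String) (out : List Int) : Prop := out = increasing_substring_alt string
instance (string : String) (out : List Int) : Decidable (Spec_increasing_substring string out) := by unfold Spec_increasing_substring; infer_instance

-- ===== CLAIM (what is proved, stated in full; the proofs are below) =====
def Claim_equal_increasing_substring : Prop := ∀ (string : String), Dom_increasing_substring string → Pre_increasing_substring string → Spec_increasing_substring string (increasing_substring string)

-- ===== LEMMAS AND PROOFS =====

theorem pvExpandRun_snoc (run : List Char) (ch : Char) :
    pvExpandRun (run ++ [ch]) = pvExpandRun run ++ [((run.length : Int) + 1)] := by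
  simp [pvExpandRun, List.range_succ]

theorem pv_fold_invariant (rest : List Char) (maxlens : List Int) (maxlen : Int)
    (runs : List (List Char)) (curr : List Char)
    (hm : maxlens = runs.flatMap pvExpandRun ++ pvExpandRun curr)
    (hl : maxlen = (curr.length : Int)) :
    (rest.foldl
      (fun (st : List Int × Int × List Char) ch =>
        let (maxlens, maxlen, curr) := st
        if curr.getLast! < ch then
          (maxlens ++ [maxlen + 1], maxlen + 1, curr ++ [ch])
        else
          (maxlens ++ [1], 1, [ch]))
      (maxlens, maxlen, curr)).1
    =
    (let st := rest.foldl
      (fun (st : List (List Char) × List Char) ch =>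
        let (runs, curr) := st
        if curr.getLast! < ch then (runs, curr ++ [ch])
        else (runs ++ [curr], [ch]))
      (runs, curr)
     (st.1 ++ [st.2]).flatMap pvExpandRun) := by
  induction rest generalizing maxlens maxlen runs curr with
  | nil =>
    simp [hm, List.flatMap_append]
  | cons ch rest ih =>
    simp only [List.foldl_cons]
    by_cases h : curr.getLast! < ch
    · simp only [if_pos h]
      refine ih _ _ _ _ ?_ ?_
      · rw [hm, hl, pvExpandRun_snoc, List.append_assoc]
      · simp [hl]
    · simp only [if_neg h]
      refine ih _ _ _ _ ?_ ?_
      · rw [hm]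
        simp [pvExpandRun, List.flatMap_append, List.range_succ]
      · rfl

-- ===== VERDICT (by name: the statement is the Claim_ definition above) =====
theorem increasing_substring_spec : Claim_equal_increasing_substring := by
  intro s _ _
  unfold Spec_increasing_substring increasing_substring increasing_substring_alt
  cases h : s.toList with
  | nil => rfl
  | cons c rest =>
    exact pv_fold_invariant rest [1] 1 [] [c] (by simp [pvExpandRun]) (by simp)
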